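-- pv_equiv track=rewrite | github.com/JBEI/prpr | parpar.py | SplitWells
-- ===== SOURCE A (Python) =====
-- def SplitWells(multWells):
--     sepdWells = {}
--     for well in multWells:
--         if (well[1] in sepdWells.keys()):
--             sepdWells[well[1]].append(well)
--         else:
--             sepdWells[well[1]] = []
--             sepdWells[well[1]].append(well)
--     return(sepdWells)
-- ===== SOURCE B (Python) =====
-- def SplitWells(multWells):
--     # Two-phase: collect distinct keys in first-occurrence order, then build each
--     # group with one filtering comprehension per key.
--     keys = []
--     for well in multWells:
--         if well[1] not in keys:
--             keys.append(well[1])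
--     return {k: [w for w in multWells if w[1] == k] for k in keys}
-- ===== Notes on version B (the rewrite author's own statement) =====
-- stated objective: alternative
-- what changed: A builds every group incrementally in a single pass with a dict membership test and in-place appends; B first collects the distinct keys in first-occurrence order and then constructs each group in one shot by filtering the input per key (a keys-then-filter dict comprehension).
import Mathlib
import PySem

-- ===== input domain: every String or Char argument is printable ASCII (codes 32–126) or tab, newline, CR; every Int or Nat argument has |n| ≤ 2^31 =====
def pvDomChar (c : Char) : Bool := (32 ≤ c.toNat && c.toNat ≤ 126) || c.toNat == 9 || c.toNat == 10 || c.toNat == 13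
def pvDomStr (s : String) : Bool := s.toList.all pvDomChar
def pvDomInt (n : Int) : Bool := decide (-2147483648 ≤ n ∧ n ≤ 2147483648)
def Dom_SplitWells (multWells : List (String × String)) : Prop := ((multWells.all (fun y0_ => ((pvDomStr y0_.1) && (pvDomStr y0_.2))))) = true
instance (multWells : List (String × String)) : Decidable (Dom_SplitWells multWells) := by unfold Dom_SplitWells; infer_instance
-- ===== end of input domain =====

-- B replaces A's single-pass dict-building loop by a keys-then-filter construction
-- (collect distinct keys in first-occurrence order, then filter the input per key);
-- a genuinely different decomposition of the same grouping, not claimed faster.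


-- ===== PORT A =====
def SplitWells (multWells : List (String × String)) : List (String × List (String × String)) :=
  (multWells.foldl
    (fun sepdWells well =>
      if sepdWells.contains well.2 then
        sepdWells.modify well.2 [] (· ++ [well])
      else
        (sepdWells.insert well.2 []).modify well.2 [] (· ++ [well]))
    PySem.Dict.empty).items

-- ===== PORT B =====
def SplitWells_alt (multWells : List (String × String)) : List (String × List (String × String)) :=
  let keys : PySem.Set String :=
    multWells.foldl (fun ks well => PySem.Set.add ks well.2) PySem.Set.empty
  keys.map (fun k => (k, multWells.filter (fun w => w.2 == k)))

-- ===== PRECONDITION & SPEC =====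
def Spec_SplitWells (multWells : List (String × String)) (out : List (String × List (String × String))) : Prop := out = SplitWells_alt multWells
instance (multWells : List (String × String)) (out : List (String × List (String × String))) : Decidable (Spec_SplitWells multWells out) := by unfold Spec_SplitWells; infer_instance

-- ===== CLAIM (what is proved, stated in full; the proofs are below) =====
def Claim_equal_SplitWells : Prop := ∀ (multWells : List (String × String)), Dom_SplitWells multWells → Spec_SplitWells multWells (SplitWells multWells)

-- ===== LEMMAS AND PROOFS =====

-- A's two branches do the same dict update: inserting [] before the append is a no-op.
theorem splitwells_step (d : PySem.Dict String (List (String × String))) (w : String × String) :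
    (if d.contains w.2 then d.modify w.2 [] (· ++ [w])
     else (d.insert w.2 []).modify w.2 [] (· ++ [w]))
      = d.modify w.2 [] (· ++ [w]) := by
  by_cases h : d.contains w.2
  · simp [h]
  · have h' : d.contains w.2 = false := by simpa using h
    have hg : d.get? w.2 = none := by
      rw [PySem.Dict.get?_eq_none_iff_contains]; exact h'
    simp [h', PySem.Dict.modify, PySem.Dict.getD_eq_get?_getD, hg,
      PySem.Dict.get?_insert_self, PySem.Dict.insert_insert_self]

-- A's loop is the canonical grouping fold (over pairs (key, value) = (w.2, w)).
theorem splitwells_fold_eq (multWells : List (String × String)) :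
    multWells.foldl
      (fun sepdWells well =>
        if sepdWells.contains well.2 then
          sepdWells.modify well.2 [] (· ++ [well])
        else
          (sepdWells.insert well.2 []).modify well.2 [] (· ++ [well]))
      PySem.Dict.empty
    = (multWells.map (fun w => (w.2, w))).foldl
        (fun d p => d.modify p.1 [] (· ++ [p.2])) PySem.Dict.empty := by
  rw [List.foldl_map]
  have hfg : (fun (sepdWells : PySem.Dict String (List (String × String))) (well : String × String) =>
      if sepdWells.contains well.2 then sepdWells.modify well.2 [] (· ++ [well])
      else (sepdWells.insert well.2 []).modify well.2 [] (· ++ [well]))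
      = fun d w => d.modify w.2 [] (· ++ [w]) :=
    funext fun d => funext fun w => splitwells_step d w
  rw [hfg]

theorem SplitWells_spec' (multWells : List (String × String)) :
    SplitWells multWells = SplitWells_alt multWells := by
  unfold SplitWells SplitWells_alt
  rw [splitwells_fold_eq]
  set l := multWells.map (fun w => (w.2, w)) with hl
  have hnd : ((l.foldl (fun d p => d.modify p.1 [] (· ++ [p.2])) PySem.Dict.empty).keys).Nodup := by
    simpa using PySem.Dict.nodup_keys_foldl_modify_key l Prod.fst []
      (fun d p => (· ++ [p.2])) PySem.Dict.empty (by simp)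
  rw [PySem.Dict.items_eq_map_keys _ hnd ([] : List (String × String))]
  have hkeys : (l.foldl (fun d p => d.modify p.1 [] (· ++ [p.2])) PySem.Dict.empty).keys
      = PySem.Set.ofList (multWells.map (fun w => w.2)) := by
    rw [PySem.Dict.keys_foldl_modify_key]
    simp [hl, List.map_map, PySem.Set.update_nil_left, Function.comp_def]
  have hset : multWells.foldl (fun ks well => PySem.Set.add ks well.2) PySem.Set.empty
      = PySem.Set.ofList (multWells.map (fun w => w.2)) := by
    rw [← PySem.Set.update_map_eq_foldl_add]
    simp [PySem.Set.empty, PySem.Set.update_nil_left]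
  rw [hkeys, hset]
  refine List.map_congr_left (fun k _ => ?_)
  have hgetD : (l.foldl (fun d p => d.modify p.1 [] (· ++ [p.2])) PySem.Dict.empty).getD k []
      = multWells.filter (fun w => w.2 == k) := by
    rw [PySem.Dict.getD_foldl_modify_append]
    simp [hl, List.filter_map, Function.comp_def, List.map_map]
  rw [hgetD]

-- ===== VERDICT (by name: the statement is the Claim_ definition above) =====
theorem SplitWells_spec : Claim_equal_SplitWells := by
  intro multWells _
  exact SplitWells_spec' multWells
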